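-- pv_equiv track=rewrite | github.com/Run-Surge/Parallelization_Module | testcases/detect_const_cols.py | detect_constant_columns
-- ===== SOURCE A (Python) =====
-- def detect_constant_columns(data):
--     numeric_data = []
--     for row in data[1:]:  # Skip header
--         numeric_row = []
--         for x in row:
--             numeric_row.append(x)
--         numeric_data.append(numeric_row)
--
--     num_columns = len(numeric_data[0])
--     num_rows = len(numeric_data)
--     is_constant = []
--     for col_idx in range(num_columns):
--         first_value = numeric_data[0][col_idx]
--         constant = True
--         for row_idx in range(1, num_rows):
--             if numeric_data[row_idx][col_idx] != first_value:
--                 constant = False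
--                 break
--         if constant:
--             is_constant.append(1)
--     aggregation = "c:is_constant"
--     return is_constant
-- ===== SOURCE B (Python) =====
-- def detect_constant_columns(data):
--     rows = data[1:]
--     first = rows[0]  # IndexError when there are no data rows, as in A
--     flags = [True] * len(first)
--     for row in rows[1:]:
--         flags = [f and x == v for f, v, x in zip(flags, first, row)]
--     return [1] * sum(flags)
-- ===== Notes on version B (the rewrite author's own statement) =====
-- stated objective: alternative
-- what changed: B replaces A's column-major per-column scans (with early break) by a single row-major pass that keeps a Boolean flag per column, and-ing it with an element-wise comparison of each row against the first data row, then emits [1]*sum(flags).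
-- outside the precondition, e.g. on detect_constant_columns([[0], [1, 2], [9, 9], [8]]): A returns [], B returns []
import Mathlib
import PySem

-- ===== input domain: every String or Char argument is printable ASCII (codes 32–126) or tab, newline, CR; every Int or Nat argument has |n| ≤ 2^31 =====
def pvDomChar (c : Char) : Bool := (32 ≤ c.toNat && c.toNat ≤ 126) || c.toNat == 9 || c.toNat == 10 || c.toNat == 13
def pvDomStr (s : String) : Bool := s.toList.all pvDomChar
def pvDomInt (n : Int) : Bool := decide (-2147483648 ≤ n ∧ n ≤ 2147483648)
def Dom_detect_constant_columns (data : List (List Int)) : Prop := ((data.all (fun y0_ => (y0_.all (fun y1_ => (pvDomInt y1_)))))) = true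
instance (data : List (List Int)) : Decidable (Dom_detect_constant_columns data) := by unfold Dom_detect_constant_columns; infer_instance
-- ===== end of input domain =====

-- B replaces A's column-major per-column scans by a single row-major pass keeping a
-- Boolean flag per column, then returns [1]*sum(flags) (objective: alternative; no speed claim).

-- ===== PORT A =====
-- inner loop 'for row_idx in range(1, num_rows): if … != first: constant=False; break'
def pvColConst (nd : List (List Int)) (col_idx : Nat) (first_value : Int) : List Nat → Bool
  | [] => true
  | r :: rs =>
    if (nd.getD r []).getD col_idx 0 ≠ first_value then false
    else pvColConst nd col_idx first_value rs

def detect_constant_columns (data : List (List Int)) : List Int :=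
  let numeric_data :=
    (PySem.List.slice data (some 1) none).foldl
      (fun acc row => acc ++ [row.foldl (fun nr x => nr ++ [x]) []]) []
  match numeric_data with
  | [] => []  -- Python: numeric_data[0] raises IndexError here (excluded by Pre_)
  | row0 :: _ =>
    let num_columns := row0.length
    let num_rows := numeric_data.length
    (List.range num_columns).foldl
      (fun is_constant col_idx =>
        let first_value := (numeric_data.getD 0 []).getD col_idx 0
        if pvColConst numeric_data col_idx first_value (List.range' 1 (num_rows - 1)) then
          is_constant ++ [(1 : Int)]
        else is_constant) []

-- ===== PORT B =====
-- 'flags = [f and x == v for f, v, x in zip(flags, first, row)]', folded over rows[1:]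
def detect_constant_columns_alt (data : List (List Int)) : List Int :=
  match PySem.List.slice data (some 1) none with
  | [] => []  -- Python: rows[0] raises IndexError here (excluded by Pre_)
  | first :: rest =>
    let flags := rest.foldl
      (fun flags row =>
        (flags.zip (first.zip row)).map (fun fvx => fvx.1 && (fvx.2.2 == fvx.2.1)))
      (List.replicate first.length true)
    List.replicate (flags.count true) (1 : Int)

-- ===== PRECONDITION & SPEC =====
-- Pre_ requires at least one data row (A raises IndexError otherwise) and that no data row is
-- shorter than the first data row: on such ragged inputs A either raises IndexError or returns a
-- break-dependent value while B's zip silently truncates, so they are excluded.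
def Pre_detect_constant_columns (data : List (List Int)) : Prop :=
  data.drop 1 ≠ [] ∧ ∀ r ∈ data.drop 1, ((data.drop 1).headD []).length ≤ r.length
instance (data : List (List Int)) : Decidable (Pre_detect_constant_columns data) := by
  unfold Pre_detect_constant_columns; infer_instance
def pvWitness_detect_constant_columns : List (List Int) := [[0], [1, 2], [1, 3]]
def Spec_detect_constant_columns (data : List (List Int)) (out : List Int) : Prop := out = detect_constant_columns_alt data
instance (data : List (List Int)) (out : List Int) : Decidable (Spec_detect_constant_columns data out) := by unfold Spec_detect_constant_columns; infer_instance

-- ===== CLAIM (what is proved, stated in full; the proofs are below) =====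
def Claim_equal_detect_constant_columns : Prop := ∀ (data : List (List Int)), Dom_detect_constant_columns data → Pre_detect_constant_columns data → Spec_detect_constant_columns data (detect_constant_columns data)

-- ===== LEMMAS AND PROOFS =====

theorem colConst_eq (c : Nat) (f : Int) :
    ∀ (l k : Nat) (nd : List (List Int)), k + l ≤ nd.length →
    pvColConst nd c f (List.range' k l) =
      ((nd.drop k).take l).all (fun r => decide (r.getD c 0 = f)) := by
  intro l
  induction l with
  | zero => intro k nd h; simp [pvColConst]
  | succ n ih =>
    intro k nd h
    have hk : k < nd.length := by omega
    have hr : nd.drop k = nd[k] :: nd.drop (k+1) := by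
      exact List.drop_eq_getElem_cons hk
    have hget : nd.getD k [] = nd[k] := by
      simp [List.getD_eq_getElem?_getD, List.getElem?_eq_getElem hk]
    rw [List.range'_succ, hr, List.take_succ_cons, List.all_cons]
    simp only [pvColConst, hget]
    simp [ih (k+1) nd (by omega)]

-- one step of B's row-major pass, on flags of the canonical shape (range n).map P
theorem flags_step (first r : List Int) (P : Nat → Bool) (h : first.length ≤ r.length) :
    (((List.range first.length).map P).zip (first.zip r)).map
        (fun fvx => fvx.1 && (fvx.2.2 == fvx.2.1))
      = (List.range first.length).map (fun c => P c && (r.getD c 0 == first.getD c 0)) := by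
  apply List.ext_getElem
  · simp; omega
  · intro c h1 h2
    have hc : c < first.length := by simpa using h2
    have hcr : c < r.length := by omega
    simp [List.getElem_zip, List.getD_eq_getElem?_getD, List.getElem?_eq_getElem hc,
      List.getElem?_eq_getElem hcr]

theorem flags_fold (first : List Int) :
    ∀ (rows : List (List Int)) (P : Nat → Bool), (∀ r ∈ rows, first.length ≤ r.length) →
    rows.foldl
        (fun flags row =>
          (flags.zip (first.zip row)).map (fun fvx => fvx.1 && (fvx.2.2 == fvx.2.1)))
        ((List.range first.length).map P)
      = (List.range first.length).map
          (fun c => P c && rows.all (fun r => r.getD c 0 == first.getD c 0)) := by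
  intro rows
  induction rows with
  | nil => intro P _; simp
  | cons r rs ih =>
    intro P h
    rw [List.foldl_cons, flags_step first r P (h r (by simp))]
    rw [ih _ (fun x hx => h x (by simp [hx]))]
    refine List.map_congr_left (fun c _ => ?_)
    simp [Bool.and_assoc]

theorem ab_agree : ∀ (data : List (List Int)), Pre_detect_constant_columns data →
    detect_constant_columns data = detect_constant_columns_alt data := by
  intro data hpre
  obtain ⟨hne, hlen⟩ := hpre
  have hslice : PySem.List.slice data (some 1) none = data.drop 1 := by
    simpa using PySem.List.slice_from_natCast data 1
  obtain ⟨row0, rest, hrows⟩ : ∃ row0 rest, data.drop 1 = row0 :: rest := by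
    cases h : data.drop 1 with
    | nil => exact absurd h hne
    | cons a t => exact ⟨a, t, rfl⟩
  have hlen' : ∀ r ∈ rest, row0.length ≤ r.length := by
    intro r hr
    have := hlen r (by rw [hrows]; simp [hr])
    simpa [hrows] using this
  unfold detect_constant_columns detect_constant_columns_alt
  rw [hslice, hrows]
  have hcopy : ((row0 :: rest).foldl
      (fun acc row => acc ++ [row.foldl (fun nr x => nr ++ [x]) []]) []) = row0 :: rest := by
    rw [PySem.List.foldl_append_singleton_eq_map]
    simp only [List.nil_append]
    have inner : ∀ row : List Int, row.foldl (fun nr x => nr ++ [x]) [] = row := by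
      intro row; simpa using PySem.List.foldl_append_singleton_eq_self (l := row) (acc := [])
    have houter : List.map (List.foldl (fun nr x => nr ++ [x]) []) rest = List.map id rest :=
      List.map_congr_left (fun r _ => inner r)
    simp [inner, houter]
  rw [hcopy]
  simp only [List.length_cons, List.getD_cons_zero, Nat.add_sub_cancel]
  rw [PySem.List.foldl_append_if]
  have hinit : List.replicate row0.length true
      = (List.range row0.length).map (fun _ => true) := by
    simp [List.map_const']
  rw [hinit, flags_fold row0 rest (fun _ => true) hlen']
  -- A's filter-append form vs B's replicate-of-count form
  rw [List.nil_append]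
  have hfm : ∀ (l : List Nat), (l.map (fun _ => (1 : Int))) = List.replicate l.length 1 := by
    intro l; simp [List.map_const']
  rw [hfm, ← List.countP_eq_length_filter]
  congr 1
  rw [List.count, List.countP_map]
  refine (List.countP_congr (fun c hc => ?_)).symm
  simp only [Function.comp]
  rw [colConst_eq c (row0.getD c 0) rest.length 1 (row0 :: rest) (by simp [Nat.add_comm])]
  simp

-- ===== VERDICT (by name: the statement is the Claim_ definition above) =====
theorem detect_constant_columns_spec : Claim_equal_detect_constant_columns := by
  intro data _ hpre
  exact ab_agree data hpre
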